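-- pv_equiv track=rewrite | github.com/alexandraback/datacollection | solutions_5751500831719424_0/Python/giwon/a.py | get_min_action_cnt_char_to_be_same
-- ===== SOURCE A (Python) =====
-- def get_min_action_cnt_char_to_be_same(cnts):
--     min_num = min(cnts)
--     max_num = max(cnts)
--     min_action = 10000000
--     for n in range(min_num, max_num + 1):
--         action = 0
--         for cnt in cnts:
--             action += abs(cnt - n)
--         min_action = min(min_action, action)
--     return min_action
-- ===== SOURCE B (Python) =====
-- def get_min_action_cnt_char_to_be_same(cnts):
--     # One pass per element plus one pass over the value range: instead of
--     # recomputing sum(|cnt-n|) from scratch for every candidate n, start at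
--     # n = min(cnts) and update the deviation sum incrementally using an
--     # occurrence counter (f(n+1) = f(n) + 2*#{c <= n} - len(cnts)).
--     lo = min(cnts)
--     hi = max(cnts)
--     occ = {}
--     for c in cnts:
--         occ[c] = occ.get(c, 0) + 1
--     total = len(cnts)
--     cur = 0
--     for c in cnts:
--         cur += c - lo
--     best = min(10000000, cur)
--     le = 0
--     for n in range(lo + 1, hi + 1):
--         le += occ.get(n - 1, 0)
--         cur += 2 * le - total
--         best = min(best, cur)
--     return best
-- ===== Notes on version B (the rewrite author's own statement) =====
-- stated objective: faster
-- what changed: Instead of rescanning the whole list to recompute sum(|cnt-n|) for every candidate n, B builds an occurrence counter in one pass and walks the value range once, updating the deviation sum incrementally (f(n+1) = f(n) + 2*#{c<=n} - len).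
import Mathlib
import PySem

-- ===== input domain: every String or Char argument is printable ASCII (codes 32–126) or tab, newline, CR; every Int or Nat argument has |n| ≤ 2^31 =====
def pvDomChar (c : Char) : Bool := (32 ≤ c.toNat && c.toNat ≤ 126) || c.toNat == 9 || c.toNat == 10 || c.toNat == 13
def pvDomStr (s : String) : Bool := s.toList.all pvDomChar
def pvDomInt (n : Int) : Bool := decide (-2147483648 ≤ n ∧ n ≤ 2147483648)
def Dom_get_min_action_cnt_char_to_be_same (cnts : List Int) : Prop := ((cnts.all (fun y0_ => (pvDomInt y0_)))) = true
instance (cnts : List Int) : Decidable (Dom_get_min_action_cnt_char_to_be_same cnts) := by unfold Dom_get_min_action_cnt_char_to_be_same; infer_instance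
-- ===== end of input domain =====

-- B replaces A's rescan of the whole list for every candidate value by one counting
-- pass plus an incremental update of the deviation sum along the value range
-- (objective: faster; A rescans the list per candidate, B does not).

-- ===== PORT A =====
def get_min_action_cnt_char_to_be_same (cnts : List Int) : Int :=
  let min_num := (PySem.List.min? cnts (fun x => x)).getD 0
  let max_num := (PySem.List.max? cnts (fun x => x)).getD 0
  (PySem.List.pyRange min_num (max_num + 1) 1).foldl
    (fun min_action n =>
      let action := cnts.foldl (fun action cnt => action + |cnt - n|) 0
      min min_action action) 10000000

-- ===== PORT B =====
-- the body of B's 'for n in range(lo+1, hi+1)' loop; state = (le, cur, best)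
def pvStep (occ : PySem.Dict Int Int) (total : Int) (st : Int × Int × Int) (n : Int) : Int × Int × Int :=
  (st.1 + occ.getD (n - 1) 0,
   st.2.1 + 2 * (st.1 + occ.getD (n - 1) 0) - total,
   min st.2.2 (st.2.1 + 2 * (st.1 + occ.getD (n - 1) 0) - total))

def get_min_action_cnt_char_to_be_same_alt (cnts : List Int) : Int :=
  let lo := (PySem.List.min? cnts (fun x => x)).getD 0
  let hi := (PySem.List.max? cnts (fun x => x)).getD 0
  let occ := cnts.foldl (fun d c => d.insert c (d.getD c 0 + 1)) PySem.Dict.empty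
  let total : Int := cnts.length
  let cur := cnts.foldl (fun cur c => cur + (c - lo)) 0
  let best := min 10000000 cur
  ((PySem.List.pyRange (lo + 1) (hi + 1) 1).foldl (pvStep occ total) ((0 : Int), cur, best)).2.2

-- ===== PRECONDITION & SPEC =====
-- Pre_ excludes only the empty list, on which Python's min([]) raises ValueError.
def Pre_get_min_action_cnt_char_to_be_same (cnts : List Int) : Prop := cnts ≠ []
instance (cnts : List Int) : Decidable (Pre_get_min_action_cnt_char_to_be_same cnts) := by unfold Pre_get_min_action_cnt_char_to_be_same; infer_instance
def pvWitness_get_min_action_cnt_char_to_be_same : List Int := [3, 1, 1, 5]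

def Spec_get_min_action_cnt_char_to_be_same (cnts : List Int) (out : Int) : Prop := out = get_min_action_cnt_char_to_be_same_alt cnts
instance (cnts : List Int) (out : Int) : Decidable (Spec_get_min_action_cnt_char_to_be_same cnts out) := by unfold Spec_get_min_action_cnt_char_to_be_same; infer_instance

-- ===== CLAIM (what is proved, stated in full; the proofs are below) =====
def Claim_equal_get_min_action_cnt_char_to_be_same : Prop := ∀ (cnts : List Int), Dom_get_min_action_cnt_char_to_be_same cnts → Pre_get_min_action_cnt_char_to_be_same cnts → Spec_get_min_action_cnt_char_to_be_same cnts (get_min_action_cnt_char_to_be_same cnts)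

-- ===== LEMMAS AND PROOFS =====

-- the deviation sum A computes for a candidate n
def pvF (cnts : List Int) (n : Int) : Int := cnts.foldl (fun action cnt => action + |cnt - n|) 0

-- number of elements ≤ n, as an indicator sum
def pvLE (cnts : List Int) (n : Int) : Int := (cnts.map (fun c => if c ≤ n then (1 : Int) else 0)).sum

lemma pvF_eq_sum (cnts : List Int) (n : Int) :
    pvF cnts n = (cnts.map (fun c => |c - n|)).sum := by
  unfold pvF
  rw [PySem.List.foldl_add]
  simp

lemma pv_count_eq (l : List Int) (n : Int) :
    ((l.count n : Int)) = (l.map (fun c => if c = n then (1 : Int) else 0)).sum := by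
  induction l with
  | nil => simp
  | cons c t ih =>
    by_cases h : c = n <;>
      simp [h, ih, eq_comm] <;> omega

lemma pvLE_succ (cnts : List Int) (n : Int) :
    pvLE cnts n = pvLE cnts (n - 1) + (cnts.count n : Int) := by
  rw [pv_count_eq]
  unfold pvLE
  induction cnts with
  | nil => simp
  | cons c t ih =>
    simp only [List.map_cons, List.sum_cons]
    rcases lt_trichotomy c n with h | h | h
    · rw [if_pos (by omega), if_pos (by omega), if_neg (by omega)]
      omega
    · rw [if_pos (by omega), if_neg (by omega), if_pos h]
      omega
    · rw [if_neg (by omega), if_neg (by omega), if_neg (by omega)]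
      omega

lemma pvF_step (cnts : List Int) (n : Int) :
    pvF cnts (n + 1) = pvF cnts n + 2 * pvLE cnts n - (cnts.length : Int) := by
  rw [pvF_eq_sum, pvF_eq_sum]
  unfold pvLE
  induction cnts with
  | nil => simp
  | cons c t ih =>
    simp only [List.map_cons, List.sum_cons, List.length_cons]
    by_cases h : c ≤ n
    · have h1 : |c - (n + 1)| = |c - n| + 1 := by
        rw [abs_of_nonpos (by omega), abs_of_nonpos (by omega)]; omega
      rw [h1, if_pos h]
      push_cast
      omega
    · have h : n < c := by omega
      have h1 : |c - (n + 1)| = |c - n| - 1 := by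
        rw [abs_of_nonneg (by omega), abs_of_nonneg (by omega)]; omega
      rw [h1, if_neg (by omega)]
      push_cast
      omega

lemma pv_occ_getD (cnts : List Int) (v : Int) :
    (cnts.foldl (fun d c => d.insert c (d.getD c 0 + 1)) PySem.Dict.empty).getD v 0
      = (cnts.count v : Int) := by
  rw [PySem.Dict.getD_foldl_insert_add_one]
  simp

lemma pvStep_eval (cnts : List Int) (n : Int) (b : Int) :
    pvStep (cnts.foldl (fun d c => d.insert c (d.getD c 0 + 1)) PySem.Dict.empty)
      ((cnts.length : Int)) (pvLE cnts (n - 1), pvF cnts n, b) (n + 1)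
      = (pvLE cnts n, pvF cnts (n + 1), min b (pvF cnts (n + 1))) := by
  simp only [pvStep]
  rw [show (n + 1 : Int) - 1 = n from by ring, pv_occ_getD, ← pvLE_succ, ← pvF_step]

-- B's incremental loop computes the same running minimum as A's rescan loop
lemma pv_loop (cnts : List Int) (hi : Int) : ∀ (k : Nat) (n b : Int), (hi - n).toNat = k →
    ((PySem.List.pyRange (n + 1) (hi + 1) 1).foldl
      (pvStep (cnts.foldl (fun d c => d.insert c (d.getD c 0 + 1)) PySem.Dict.empty)
        ((cnts.length : Int)))
      (pvLE cnts (n - 1), pvF cnts n, b)).2.2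
    = (PySem.List.pyRange (n + 1) (hi + 1) 1).foldl (fun acc m => min acc (pvF cnts m)) b := by
  intro k
  induction k with
  | zero =>
    intro n b hk
    rw [PySem.List.pyRange_one_eq_nil (by omega : hi + 1 ≤ n + 1)]
    rfl
  | succ k ih =>
    intro n b hk
    rw [PySem.List.pyRange_one_cons (by omega : n + 1 < hi + 1)]
    simp only [List.foldl_cons]
    rw [pvStep_eval]
    have hthis := ih (n + 1) (min b (pvF cnts (n + 1))) (by omega)
    rw [show (n + 1 : Int) - 1 = n from by ring] at hthis
    exact hthis

-- ===== VERDICT (by name: the statement is the Claim_ definition above) =====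
theorem get_min_action_cnt_char_to_be_same_spec : Claim_equal_get_min_action_cnt_char_to_be_same := by
  intro cnts _hdom hpre
  unfold Spec_get_min_action_cnt_char_to_be_same
  unfold Pre_get_min_action_cnt_char_to_be_same at hpre
  obtain ⟨lo, hlo⟩ : ∃ lo, PySem.List.min? cnts (fun x => x) = some lo := by
    cases h : PySem.List.min? cnts (fun x => x) with
    | none => exact absurd ((PySem.List.min?_eq_none_iff _ _).mp h) hpre
    | some m => exact ⟨m, rfl⟩
  obtain ⟨hi, hhi⟩ : ∃ hi, PySem.List.max? cnts (fun x => x) = some hi := by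
    cases h : PySem.List.max? cnts (fun x => x) with
    | none => exact absurd ((PySem.List.max?_eq_none_iff _ _).mp h) hpre
    | some m => exact ⟨m, rfl⟩
  have hlo_min : ∀ y ∈ cnts, lo ≤ y := PySem.List.min?_isMin hlo
  have hhi_max : ∀ y ∈ cnts, y ≤ hi := PySem.List.max?_isMax hhi
  have hlohi : lo ≤ hi := by
    obtain ⟨c, hc⟩ := List.exists_mem_of_ne_nil cnts hpre
    exact le_trans (hlo_min c hc) (hhi_max c hc)
  unfold get_min_action_cnt_char_to_be_same get_min_action_cnt_char_to_be_same_alt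
  simp only [hlo, hhi, Option.getD_some]
  -- B's first accumulation pass: sum of (c - lo) equals the deviation sum at lo
  have hcur : cnts.foldl (fun cur c => cur + (c - lo)) 0 = pvF cnts lo := by
    unfold pvF
    apply PySem.List.foldl_congr_mem
    intro acc c hc
    rw [abs_of_nonneg (by have := hlo_min c hc; omega)]
  -- no element lies below the minimum
  have hle0 : pvLE cnts (lo - 1) = 0 := by
    unfold pvLE
    have h : cnts.map (fun c => if c ≤ lo - 1 then (1 : Int) else 0)
        = cnts.map (fun _ => (0 : Int)) := by
      apply List.map_congr_left
      intro c hc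
      rw [if_neg (by have := hlo_min c hc; omega)]
    rw [h]
    simp
  -- peel the first candidate (the minimum) off A's range
  rw [PySem.List.pyRange_one_cons (by omega : lo < hi + 1)]
  simp only [List.foldl_cons]
  have hmain := pv_loop cnts hi (hi - lo).toNat lo (min 10000000 (pvF cnts lo)) rfl
  rw [hle0] at hmain
  simp only [pvF] at hmain hcur
  rw [hcur]
  exact hmain.symm
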